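-- pv_equiv track=rewrite | github.com/paulcwlin/tf.keras-test | util1.py | get_idxs
-- ===== SOURCE A (Python) =====
-- def get_idxs(imgs, labs, start, num, by0123):
--     if by0123 == False:
--         return range(start, num)
--     size = len(imgs)
--     idx_list = []
--     idx_read = [0 for i in range(10)]
--     for i in range(size):
--         n = i % 10
--         for j in range(idx_read[n], size):
--             if labs[j] == n:
--                 idx_list.append(j)
--                 idx_read[n] = j + 1
--                 break
--         else:
--             idx_read[n] = size
--     if start + num > len(idx_list):
--         return idx_list[start: ]
--     else:
--         return idx_list[start: num]
-- ===== SOURCE B (Python) =====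
-- def get_idxs(imgs, labs, start, num, by0123):
--     if by0123 == False:
--         return range(start, num)
--     size = len(imgs)
--     buckets = [[] for _ in range(10)]
--     for j in range(size):
--         v = labs[j]
--         if 0 <= v < 10:
--             buckets[v].append(j)
--     rounds = (size + 9) // 10
--     idx_list = []
--     for r in range(rounds):
--         for n in range(10):
--             if 10 * r + n < size and r < len(buckets[n]):
--                 idx_list.append(buckets[n][r])
--     if start + num > len(idx_list):
--         return idx_list[start:]
--     else:
--         return idx_list[start:num]
-- ===== Notes on version B (the rewrite author's own statement) =====
-- stated objective: alternative
-- what changed: A walks i=0..size-1 keeping a per-label cursor array and rescanning labs from the cursor for each i; B makes one bucketing pass (buckets[label] = sorted index list) and then emits buckets[n][r] in a round-major double loop r x label, with the same ==False guard and final slice branching.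
import Mathlib
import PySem

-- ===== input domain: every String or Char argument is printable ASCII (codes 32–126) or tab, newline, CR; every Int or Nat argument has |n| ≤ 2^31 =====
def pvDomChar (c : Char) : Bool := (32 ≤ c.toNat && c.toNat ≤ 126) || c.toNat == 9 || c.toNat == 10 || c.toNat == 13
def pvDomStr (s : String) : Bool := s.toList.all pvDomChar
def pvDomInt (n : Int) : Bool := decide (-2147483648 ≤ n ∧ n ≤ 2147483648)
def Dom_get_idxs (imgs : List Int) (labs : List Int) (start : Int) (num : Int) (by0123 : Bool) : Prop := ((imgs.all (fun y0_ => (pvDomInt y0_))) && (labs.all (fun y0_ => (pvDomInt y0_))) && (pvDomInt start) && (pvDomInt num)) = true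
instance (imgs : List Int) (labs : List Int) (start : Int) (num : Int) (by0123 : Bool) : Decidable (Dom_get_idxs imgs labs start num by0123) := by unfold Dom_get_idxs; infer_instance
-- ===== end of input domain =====

-- B replaces A's stateful cursor-per-label rescanning with prebuilt per-label buckets
-- interleaved round by round (same return value; alternative decomposition, no speed claim).

-- ===== PORT A =====
-- inner 'for j in range(idx_read[n], size): if labs[j]==n: … break' loop of A;
-- labs.getD j 0 is exact for j < labs.length (Pre_ guarantees that; outside Pre_ Python raises IndexError)
def pvScanA (labs : List Int) (x : Int) (p size : Nat) : Option Nat :=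
  if h : p < size then
    if labs.getD p 0 = x then some p else pvScanA labs x (p + 1) size
  else none
termination_by size - p
decreasing_by omega

-- one iteration of A's outer 'for i in range(size)' loop over the state (idx_list, idx_read)
def pvStepA (labs : List Int) (size : Nat) (st : List Int × List Nat) (i : Nat) : List Int × List Nat :=
  let n := i % 10
  match pvScanA labs (n : Int) (st.2.getD n 0) size with
  | some j => (st.1 ++ [(j : Int)], st.2.set n (j + 1))
  | none => (st.1, st.2.set n size)

def get_idxs (imgs : List Int) (labs : List Int) (start : Int) (num : Int) (by0123 : Bool) : List Int :=
  if by0123 = false then PySem.List.pyRange start num 1 else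
  let size := imgs.length
  let st := (List.range size).foldl (pvStepA labs size) ([], List.replicate 10 0)
  if start + num > (st.1.length : Int) then PySem.List.slice st.1 (some start) none
  else PySem.List.slice st.1 (some start) (some num)

-- ===== PORT B =====
-- one iteration of B's bucket-building pass: append index j to buckets[labs[j]] when 0 <= labs[j] < 10
def pvBStep (labs : List Int) (bs : List (List Int)) (j : Nat) : List (List Int) :=
  let v := labs.getD j 0
  if 0 ≤ v ∧ v < 10 then bs.set v.toNat (bs.getD v.toNat [] ++ [(j : Int)]) else bs

def get_idxs_alt (imgs : List Int) (labs : List Int) (start : Int) (num : Int) (by0123 : Bool) : List Int :=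
  if by0123 = false then PySem.List.pyRange start num 1 else
  let size := imgs.length
  let buckets := (List.range size).foldl (pvBStep labs) (List.replicate 10 [])
  let rounds := (size + 9) / 10
  let idx_list := (List.range rounds).foldl (fun acc r =>
      (List.range 10).foldl (fun acc n =>
        if 10 * r + n < size ∧ r < (buckets.getD n []).length
        then acc ++ [(buckets.getD n []).getD r 0] else acc) acc) []
  if start + num > (idx_list.length : Int) then PySem.List.slice idx_list (some start) none
  else PySem.List.slice idx_list (some start) (some num)

-- ===== PRECONDITION & SPEC =====
-- Pre_ excludes exactly the inputs where Python A raises IndexError (by0123 truthy with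
-- labs shorter than imgs: the label scan always runs past the end of labs); B raises there too.
def Pre_get_idxs (imgs : List Int) (labs : List Int) (start : Int) (num : Int) (by0123 : Bool) : Prop :=
  by0123 = true → imgs.length ≤ labs.length
instance (imgs : List Int) (labs : List Int) (start : Int) (num : Int) (by0123 : Bool) : Decidable (Pre_get_idxs imgs labs start num by0123) := by unfold Pre_get_idxs; infer_instance

def pvWitness_get_idxs : List Int × List Int × Int × Int × Bool := ([7, 7, 7], [0, 1, 2], 0, 3, true)

def Spec_get_idxs (imgs : List Int) (labs : List Int) (start : Int) (num : Int) (by0123 : Bool) (out : List Int) : Prop := out = get_idxs_alt imgs labs start num by0123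
instance (imgs : List Int) (labs : List Int) (start : Int) (num : Int) (by0123 : Bool) (out : List Int) : Decidable (Spec_get_idxs imgs labs start num by0123 out) := by unfold Spec_get_idxs; infer_instance

-- ===== CLAIM (what is proved, stated in full; the proofs are below) =====
def Claim_equal_get_idxs : Prop := ∀ (imgs : List Int) (labs : List Int) (start : Int) (num : Int) (by0123 : Bool), Dom_get_idxs imgs labs start num by0123 → Pre_get_idxs imgs labs start num by0123 → Spec_get_idxs imgs labs start num by0123 (get_idxs imgs labs start num by0123)

-- ===== LEMMAS AND PROOFS =====

-- the sorted list of indices j < size with labs[j] = n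
def pvBucket (labs : List Int) (size n : Nat) : List Nat :=
  (List.range size).filter (fun j => labs.getD j 0 = (n : Int))

-- the canonical order produced by both programs, read off from A's loop counter
def pvCanon (labs : List Int) (size m : Nat) : List Nat :=
  (List.range m).filterMap (fun i => (pvBucket labs size (i % 10))[i / 10]?)

-- closed form of A's idx_read[n] after m outer iterations
def pvRead (labs : List Int) (size m n : Nat) : Nat :=
  let c := (m + 9 - n) / 10
  if c = 0 then 0
  else if c ≤ (pvBucket labs size n).length then (pvBucket labs size n).getD (c - 1) 0 + 1
  else size

theorem pvScanA_eq_head? (labs : List Int) (x : Int) (size : Nat) :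
    ∀ k p, size - p = k →
      pvScanA labs x p size
        = (((List.range' p k)).filter (fun j => labs.getD j 0 = x)).head? := by
  intro k
  induction k with
  | zero => intro p hp; rw [pvScanA]; simp; omega
  | succ k ih =>
    intro p hp
    have hlt : p < size := by omega
    rw [pvScanA]
    rw [dif_pos hlt, List.range'_succ, List.filter_cons]
    simp only [List.getD] at ih ⊢
    by_cases hx : labs[p]?.getD 0 = x
    · rw [if_pos hx]; simp [hx]
    · rw [if_neg hx, ih (p+1) (by omega)]; simp [hx]

theorem pvScanA_eq_bucket (labs : List Int) (n : Nat) (size p : Nat) (hp : p ≤ size) :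
    pvScanA labs (n : Int) p size
      = ((pvBucket labs size n).filter (fun j => p ≤ j)).head? := by
  rw [pvScanA_eq_head? labs _ size (size - p) p rfl]
  unfold pvBucket
  have hsz : size = p + (size - p) := by omega
  have hrange : List.range size = List.range' 0 p ++ List.range' p (size - p) := by
    rw [List.range_eq_range']
    conv_lhs => rw [hsz]
    rw [← List.range'_append]
    norm_num
  rw [hrange, List.filter_append, List.filter_append]
  have h1 : ((List.range' 0 p).filter (fun j => decide (labs.getD j 0 = (n:Int)))).filter (fun j => decide (p ≤ j)) = ([] : List Nat) := by
    rw [List.filter_eq_nil_iff]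
    intro a ha
    have := List.mem_range'.mp (List.mem_of_mem_filter ha)
    simp only [decide_eq_true_eq]
    omega
  have h2 : ((List.range' p (size - p)).filter (fun j => decide (labs.getD j 0 = (n:Int)))).filter (fun j => decide (p ≤ j)) = (List.range' p (size - p)).filter (fun j => decide (labs.getD j 0 = (n:Int))) := by
    rw [List.filter_eq_self]
    intro a ha
    have := List.mem_range'.mp (List.mem_of_mem_filter ha)
    simp only [decide_eq_true_eq]
    omega
  rw [h1, h2]
  simp

theorem pvBucket_pairwise (labs : List Int) (size n : Nat) :
    (pvBucket labs size n).Pairwise (· < ·) :=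
  (List.pairwise_lt_range).filter _

theorem pvBucket_mem_lt (labs : List Int) (size n : Nat) {j : Nat}
    (hj : j ∈ pvBucket labs size n) : j < size := by
  have := List.mem_of_mem_filter hj
  simpa using this

theorem pv_filter_succ {l : List Nat} (hl : l.Pairwise (· < ·)) {c : Nat} (hc : c < l.length) :
    (l.filter (fun j => l.getD c 0 + 1 ≤ j)).head? = l[c + 1]? := by
  have hmono : ∀ i j (hi : i < l.length) (hj : j < l.length), i < j → l[i] < l[j] :=
    fun i j hi hj hij => List.pairwise_iff_getElem.mp hl i j hi hj hij
  have hgd : l.getD c 0 = l[c] := List.getD_eq_getElem l 0 hc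
  rw [hgd]
  obtain ⟨v, hv⟩ : ∃ v, l[c] = v := ⟨_, rfl⟩
  rw [hv]
  have hsplit : l = l.take (c+1) ++ l.drop (c+1) := (List.take_append_drop _ _).symm
  conv_lhs => rw [hsplit]
  rw [List.filter_append]
  have h1 : (l.take (c+1)).filter (fun j => decide (v + 1 ≤ j)) = [] := by
    rw [List.filter_eq_nil_iff]
    intro a ha
    obtain ⟨i, hi, rfl⟩ := List.getElem_of_mem ha
    simp only [List.length_take] at hi
    have hilen : i < l.length := by omega
    rw [List.getElem_take]
    have hle : l[i] ≤ l[c] := by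
      rcases Nat.lt_or_ge i c with h | h
      · exact le_of_lt (hmono i c hilen hc h)
      · have : i = c := by omega
        subst this; exact le_refl _
    simp only [decide_eq_true_eq]
    omega
  have h2 : (l.drop (c+1)).filter (fun j => decide (v + 1 ≤ j)) = l.drop (c+1) := by
    rw [List.filter_eq_self]
    intro a ha
    obtain ⟨i, hi, rfl⟩ := List.getElem_of_mem ha
    simp only [List.length_drop] at hi
    rw [List.getElem_drop]
    have hilen : c + 1 + i < l.length := by omega
    have : l[c] < l[c+1+i] := hmono c (c+1+i) hc hilen (by omega)
    simp only [decide_eq_true_eq]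
    omega
  rw [h1, h2, List.nil_append, List.head?_drop]

theorem pv_foldl_filter {α β : Type} (c : α → Prop) [DecidablePred c] (e : α → β) :
    ∀ (l : List α) (acc : List β),
      l.foldl (fun acc n => if c n then acc ++ [e n] else acc) acc
        = acc ++ (l.filter (fun n => decide (c n))).map e := by
  intro l
  induction l with
  | nil => intro acc; simp
  | cons x xs ih =>
    intro acc
    rw [List.foldl_cons, List.filter_cons]
    by_cases hx : c x
    · rw [if_pos hx, ih, if_pos (by simpa using hx)]
      simp
    · rw [if_neg hx, ih, if_neg (by simpa using hx)]

theorem pvBucket_succ_self (labs : List Int) (m n : Nat) (h : labs.getD m 0 = (n : Int)) :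
    pvBucket labs (m+1) n = pvBucket labs m n ++ [m] := by
  unfold pvBucket
  rw [List.range_succ, List.filter_append]
  simp [List.getD] at h
  simp [h]

theorem pvBucket_succ_other (labs : List Int) (m n : Nat) (h : labs.getD m 0 ≠ (n : Int)) :
    pvBucket labs (m+1) n = pvBucket labs m n := by
  unfold pvBucket
  rw [List.range_succ, List.filter_append]
  simp [List.getD] at h
  simp [h]

theorem pv_getD_map_range {β : Type} (f : Nat → β) (k t : Nat) (ht : t < k) (d : β) :
    ((List.range k).map f).getD t d = f t := by
  rw [List.getD_eq_getElem?_getD, List.getElem?_map, List.getElem?_range ht]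
  rfl

theorem pv_set_map_range {β : Type} (f f' : Nat → β) (k t : Nat) (ht : t < k) (x : β)
    (hx : x = f' t) (hother : ∀ u, u < k → u ≠ t → f' u = f u) :
    ((List.range k).map f).set t x = (List.range k).map f' := by
  apply List.ext_getElem
  · simp
  · intro u h1 h2
    simp only [List.length_set, List.length_map, List.length_range] at h1
    rw [List.getElem_set, List.getElem_map, List.getElem_range]
    by_cases h : t = u
    · rw [if_pos h, List.getElem_map, List.getElem_range, hx, h]
    · rw [if_neg h, List.getElem_map, List.getElem_range]
      exact (hother u h1 (fun hc => h hc.symm)).symm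

theorem pv_map_range_congr {β : Type} (f f' : Nat → β) (k : Nat)
    (h : ∀ u, u < k → f' u = f u) :
    (List.range k).map f = (List.range k).map f' := by
  apply List.ext_getElem
  · simp
  · intro u h1 h2
    simp only [List.length_map, List.length_range] at h1
    rw [List.getElem_map, List.getElem_map, List.getElem_range, h u h1]

theorem pvB_buckets (labs : List Int) (m : Nat) :
    (List.range m).foldl (pvBStep labs) (List.replicate 10 [])
      = (List.range 10).map (fun n => (pvBucket labs m n).map (fun j : Nat => (j : Int))) := by
  induction m with
  | zero =>
    apply List.ext_getElem
    · simp
    · intro t h1 h2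
      simp [pvBucket]
  | succ m ih =>
    rw [List.range_succ, List.foldl_append, List.foldl_cons, List.foldl_nil, ih]
    unfold pvBStep
    by_cases hv : 0 ≤ labs.getD m 0 ∧ labs.getD m 0 < 10
    · rw [if_pos hv]
      have hvt : (labs.getD m 0).toNat < 10 := by omega
      have hveq : ((labs.getD m 0).toNat : Int) = labs.getD m 0 := Int.toNat_of_nonneg hv.1
      rw [pv_getD_map_range _ 10 _ hvt]
      apply pv_set_map_range _ _ 10 _ hvt
      · rw [pvBucket_succ_self labs m _ hveq.symm, List.map_append]
        simp
      · intro u hu hne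
        rw [pvBucket_succ_other labs m u (fun hc => hne (by omega))]
    · rw [if_neg hv]
      apply pv_map_range_congr
      intro u hu
      rw [pvBucket_succ_other labs m u (fun hc => by rw [hc] at hv; omega)]

theorem pvCanon_succ (labs : List Int) (size m : Nat) :
    pvCanon labs size (m+1)
      = pvCanon labs size m ++ ((pvBucket labs size (m % 10))[m / 10]?).toList := by
  unfold pvCanon
  rw [List.range_succ, List.filterMap_append]
  cases hf : (pvBucket labs size (m % 10))[m / 10]? <;> simp [hf]

theorem pvScan_read (labs : List Int) (size m : Nat) :
    pvScanA labs ((m % 10 : Nat) : Int) (pvRead labs size m (m % 10)) size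
      = (pvBucket labs size (m % 10))[m / 10]? := by
  have hc : (m + 9 - m % 10) / 10 = m / 10 := by omega
  simp only [pvRead, hc]
  by_cases h0 : m / 10 = 0
  · rw [if_pos h0, pvScanA_eq_bucket labs _ size 0 (by omega), h0]
    have : (pvBucket labs size (m % 10)).filter (fun j => decide (0 ≤ j)) = pvBucket labs size (m % 10) := by
      rw [List.filter_eq_self]; intro a _; simp
    rw [this, List.head?_eq_getElem?]
  · rw [if_neg h0]
    by_cases hlen : m / 10 ≤ (pvBucket labs size (m % 10)).length
    · rw [if_pos hlen]
      have hlt : m / 10 - 1 < (pvBucket labs size (m % 10)).length := by omega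
      have hmem : (pvBucket labs size (m % 10)).getD (m / 10 - 1) 0 ∈ pvBucket labs size (m % 10) := by
        rw [List.getD_eq_getElem _ _ hlt]
        exact List.getElem_mem _
      have hple : (pvBucket labs size (m % 10)).getD (m / 10 - 1) 0 + 1 ≤ size :=
        pvBucket_mem_lt labs size _ hmem
      rw [pvScanA_eq_bucket labs _ size _ hple]
      rw [pv_filter_succ (pvBucket_pairwise labs size _) hlt]
      congr 1
      omega
    · rw [if_neg hlen]
      rw [pvScanA_eq_bucket labs _ size size (le_refl _)]
      have h1 : (pvBucket labs size (m % 10)).filter (fun j => decide (size ≤ j)) = [] := by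
        rw [List.filter_eq_nil_iff]
        intro a ha
        have := pvBucket_mem_lt labs size _ ha
        simp only [decide_eq_true_eq]
        omega
      rw [h1]
      simp only [List.head?_nil]
      rw [eq_comm, List.getElem?_eq_none_iff]
      omega

theorem pvA_loop (labs : List Int) (size : Nat) (m : Nat) :
    (List.range m).foldl (pvStepA labs size) ([], List.replicate 10 0)
      = ((pvCanon labs size m).map (fun j : Nat => (j : Int)),
         (List.range 10).map (pvRead labs size m)) := by
  induction m with
  | zero =>
    have h1 : pvCanon labs size 0 = [] := by simp [pvCanon]
    have h2 : (List.range 10).map (pvRead labs size 0) = List.replicate 10 0 := by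
      apply List.eq_replicate_of_mem
      intro b hb
      obtain ⟨n, hn, rfl⟩ := List.mem_map.mp hb
      have : (0 + 9 - n) / 10 = 0 := by omega
      simp [pvRead, this]
    rw [h1, h2]
    simp
  | succ m ih =>
    rw [List.range_succ, List.foldl_append, List.foldl_cons, List.foldl_nil, ih]
    have hn10 : m % 10 < 10 := Nat.mod_lt _ (by omega)
    unfold pvStepA
    simp only []
    rw [pv_getD_map_range _ 10 _ hn10, pvScan_read labs size m]
    cases hj : (pvBucket labs size (m % 10))[m / 10]? with
    | some j =>
      obtain ⟨hjlt, hjval⟩ := List.getElem?_eq_some_iff.mp hj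
      rw [pvCanon_succ, hj]
      simp only [Option.toList_some, List.map_append, Prod.mk.injEq]
      refine ⟨by simp, ?_⟩
      apply pv_set_map_range _ _ 10 _ hn10
      · have hc' : (m + 1 + 9 - m % 10) / 10 = m / 10 + 1 := by omega
        simp only [pvRead, hc']
        rw [if_neg (by omega), if_pos (by omega)]
        have h10 : m / 10 + 1 - 1 = m / 10 := by omega
        rw [h10, List.getD_eq_getElem _ _ hjlt, hjval]
      · intro u hu hne
        have : (m + 1 + 9 - u) / 10 = (m + 9 - u) / 10 := by omega
        simp only [pvRead, this]
    | none =>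
      have hjge : (pvBucket labs size (m % 10)).length ≤ m / 10 := List.getElem?_eq_none_iff.mp hj
      rw [pvCanon_succ, hj]
      simp only [Option.toList_none, List.append_nil, Prod.mk.injEq]
      refine ⟨by simp, ?_⟩
      apply pv_set_map_range _ _ 10 _ hn10
      · have hc' : (m + 1 + 9 - m % 10) / 10 = m / 10 + 1 := by omega
        simp only [pvRead, hc']
        rw [if_neg (by omega), if_neg (by omega)]
      · intro u hu hne
        have : (m + 1 + 9 - u) / 10 = (m + 9 - u) / 10 := by omega
        simp only [pvRead, this]

theorem pv_filter_getD_eq_filterMap (g : Nat → List Nat) (P : Nat → Prop) [DecidablePred P] (R : Nat) :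
    ∀ l : List Nat,
      (l.filter (fun n => decide (P n ∧ R < (g n).length))).map (fun n => (g n).getD R 0)
        = l.filterMap (fun n => if P n then (g n)[R]? else none) := by
  intro l
  induction l with
  | nil => simp
  | cons x xs ih =>
    rw [List.filter_cons, List.filterMap_cons]
    by_cases hP : P x
    · by_cases hR : R < (g x).length
      · rw [if_pos (by exact_mod_cast by simp [hP, hR] : decide (P x ∧ R < (g x).length) = true)]
        rw [List.map_cons, ih, if_pos hP, List.getElem?_eq_getElem hR]
        rw [List.getD_eq_getElem _ _ hR]
      · rw [if_neg (by simp [hP, hR])]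
        rw [ih, if_pos hP, List.getElem?_eq_none_iff.mpr (by omega)]
    · rw [if_neg (by simp [hP]), ih, if_neg hP]

theorem pvRow_eq (labs : List Int) (size R : Nat) (hR : 10 * R < size) :
    (List.range 10).filterMap (fun n => if 10 * R + n < size then (pvBucket labs size n)[R]? else none)
      = (List.range (min (size - 10 * R) 10)).filterMap (fun t => (pvBucket labs size t)[R]?) := by
  have hΔ : min (size - 10 * R) 10 + (10 - min (size - 10 * R) 10) = 10 := by omega
  conv_lhs => rw [show List.range 10 = List.range (min (size - 10 * R) 10 + (10 - min (size - 10 * R) 10)) from by rw [hΔ], List.range_add]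
  rw [List.filterMap_append, List.filterMap_map]
  have h1 : (List.range (min (size - 10 * R) 10)).filterMap (fun n => if 10 * R + n < size then (pvBucket labs size n)[R]? else none)
      = (List.range (min (size - 10 * R) 10)).filterMap (fun t => (pvBucket labs size t)[R]?) := by
    apply List.filterMap_congr
    intro t ht
    have := List.mem_range.mp ht
    rw [if_pos (by omega)]
  have h2 : (List.range (10 - min (size - 10 * R) 10)).filterMap
      ((fun n => if 10 * R + n < size then (pvBucket labs size n)[R]? else none) ∘ (min (size - 10 * R) 10 + ·)) = [] := by
    rw [List.filterMap_eq_nil_iff]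
    intro t ht
    have := List.mem_range.mp ht
    simp only [Function.comp_apply]
    rw [if_neg (by omega)]
  rw [h1, h2, List.append_nil]

theorem pvCanon_chunk (labs : List Int) (size R : Nat) :
    pvCanon labs size (min size (10 * (R + 1)))
      = pvCanon labs size (min size (10 * R))
        ++ (List.range 10).filterMap (fun n => if 10 * R + n < size then (pvBucket labs size n)[R]? else none) := by
  by_cases hR : size ≤ 10 * R
  · have h1 : min size (10 * (R + 1)) = size := by omega
    have h2 : min size (10 * R) = size := by omega
    rw [h1, h2, List.filterMap_eq_nil_iff.mpr ?_, List.append_nil]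
    intro n hn
    rw [if_neg (by have := List.mem_range.mp hn; omega)]
  · have ha : min size (10 * R) = 10 * R := by omega
    have hb : min size (10 * (R + 1)) = 10 * R + min (size - 10 * R) 10 := by omega
    rw [ha, hb, pvRow_eq labs size R (by omega)]
    unfold pvCanon
    rw [List.range_add, List.filterMap_append, List.filterMap_map]
    congr 1
    apply List.filterMap_congr
    intro t ht
    have ht' : t < min (size - 10 * R) 10 := List.mem_range.mp ht
    have hmod : (10 * R + t) % 10 = t := by omega
    have hdiv : (10 * R + t) / 10 = R := by omega
    simp only [Function.comp_apply, hmod, hdiv]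

theorem pv_getD_map_cast (l : List Nat) (r : Nat) :
    (l.map (fun j : Nat => (j : Int))).getD r 0 = (l.getD r 0 : Nat) := by
  rw [List.getD_eq_getElem?_getD, List.getD_eq_getElem?_getD, List.getElem?_map]
  cases l[r]? <;> simp

theorem pvB_interleave (labs : List Int) (size : Nat) :
    ∀ R : Nat,
      (List.range R).foldl (fun acc r =>
        (List.range 10).foldl (fun acc n =>
          if 10 * r + n < size ∧ r < (pvBucket labs size n).length
          then acc ++ [((pvBucket labs size n).getD r 0 : Int)] else acc) acc) []
        = (pvCanon labs size (min size (10 * R))).map (fun j : Nat => (j : Int)) := by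
  intro R
  induction R with
  | zero => simp [pvCanon]
  | succ R ih =>
    rw [show List.range (R + 1) = List.range R ++ [R] from List.range_succ, List.foldl_append, List.foldl_cons, List.foldl_nil, ih]
    rw [pv_foldl_filter (fun n => 10 * R + n < size ∧ R < (pvBucket labs size n).length)
        (fun n => ((pvBucket labs size n).getD R 0 : Int)) (List.range 10)]
    rw [pvCanon_chunk labs size R, List.map_append]
    congr 1
    rw [← pv_filter_getD_eq_filterMap (fun n => pvBucket labs size n) (fun n => 10 * R + n < size) R (List.range 10)]
    rw [List.map_map]
    rfl

-- ===== VERDICT (by name: the statement is the Claim_ definition above) =====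
theorem get_idxs_spec : Claim_equal_get_idxs := by
  unfold Claim_equal_get_idxs Spec_get_idxs
  intro imgs labs start num by0123 _hdom _hpre
  unfold get_idxs get_idxs_alt
  by_cases hb : by0123 = false
  · rw [if_pos hb, if_pos hb]
  · rw [if_neg hb, if_neg hb]
    dsimp only
    rw [pvA_loop labs imgs.length imgs.length, pvB_buckets labs imgs.length]
    have hBody : (fun (acc : List Int) (r : Nat) =>
        (List.range 10).foldl (fun acc n =>
          if 10 * r + n < imgs.length ∧ r < (((List.range 10).map (fun n => (pvBucket labs imgs.length n).map (fun j : Nat => (j : Int)))).getD n []).length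
          then acc ++ [(((List.range 10).map (fun n => (pvBucket labs imgs.length n).map (fun j : Nat => (j : Int)))).getD n []).getD r 0] else acc) acc)
        = (fun (acc : List Int) (r : Nat) =>
        (List.range 10).foldl (fun acc n =>
          if 10 * r + n < imgs.length ∧ r < (pvBucket labs imgs.length n).length
          then acc ++ [((pvBucket labs imgs.length n).getD r 0 : Int)] else acc) acc) := by
      funext acc r
      apply PySem.List.foldl_congr_mem
      intro acc n hn
      have hn10 : n < 10 := List.mem_range.mp hn
      rw [pv_getD_map_range _ 10 _ hn10, List.length_map, pv_getD_map_cast]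
    rw [hBody, pvB_interleave labs imgs.length ((imgs.length + 9) / 10)]
    have hmin : min imgs.length (10 * ((imgs.length + 9) / 10)) = imgs.length := by omega
    rw [hmin]
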